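-- pv_equiv track=rewrite | github.com/phil65/schemez | src/schemez/tool_executor/executor.py | _clean_generated_code
-- ===== SOURCE A (Python) =====
-- def _clean_generated_code(code: str) -> str:
--     """Clean generated code by removing future imports and headers."""
--     lines = code.split("\n")
--     cleaned_lines = []
--     skip_until_class = True
--
--     for line in lines:
--         # Skip lines until we find a class or other meaningful content
--         if skip_until_class:
--             if line.strip().startswith("class ") or (
--                 line.strip()
--                 and not line.startswith("#")
--                 and not line.startswith("from __future__")
--             ):
--                 skip_until_class = False
--                 cleaned_lines.append(line)
--             continue
--         cleaned_lines.append(line)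
--
--     return "\n".join(cleaned_lines)
-- ===== SOURCE B (Python) =====
-- def _is_meaningful(line: str) -> bool:
--     return bool(
--         line.strip().startswith("class ")
--         or (
--             line.strip()
--             and not line.startswith("#")
--             and not line.startswith("from __future__")
--         )
--     )
--
--
-- def _clean_generated_code(code: str) -> str:
--     """Clean generated code by removing future imports and headers."""
--     # Peel header lines off the front and return a suffix of the original
--     # string; no line list, accumulator or join is ever built.
--     rest = code
--     while True:
--         line, sep, tail = rest.partition("\n")
--         if _is_meaningful(line):
--             return rest
--         if not sep:
--             return ""
--         rest = tail
-- ===== Notes on version B (the rewrite author's own statement) =====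
-- stated objective: alternative
-- what changed: Instead of splitting into a line list and rebuilding the kept lines with a skip-flag accumulator and join, B peels one line at a time off the front with str.partition and returns the matching suffix of the original string directly (or '' if every line is a header).
import Mathlib
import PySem

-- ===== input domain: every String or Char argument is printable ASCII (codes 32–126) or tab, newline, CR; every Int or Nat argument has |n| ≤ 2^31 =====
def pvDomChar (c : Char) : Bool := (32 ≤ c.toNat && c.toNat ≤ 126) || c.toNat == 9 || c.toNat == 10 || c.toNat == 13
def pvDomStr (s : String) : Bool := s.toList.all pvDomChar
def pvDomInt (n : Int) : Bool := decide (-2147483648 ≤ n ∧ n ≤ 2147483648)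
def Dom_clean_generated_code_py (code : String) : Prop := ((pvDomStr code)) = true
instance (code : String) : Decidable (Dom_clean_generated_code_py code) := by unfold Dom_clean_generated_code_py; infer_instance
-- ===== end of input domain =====

-- B peels header lines off the front with str.partition and returns a suffix of the
-- original string, instead of A's split / skip-flag accumulator / join (alternative; return value only).

-- The meaningfulness test, identical text in both Pythons:
-- line.strip().startswith("class ") or (line.strip() and not line.startswith("#") and not line.startswith("from __future__"))
def pvMeaningful (line : String) : Bool :=
  PySem.Str.startswith (PySem.Str.strip line) "class " ||
  (PySem.Str.len (PySem.Str.strip line) != 0 &&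
    !PySem.Str.startswith line "#" &&
    !PySem.Str.startswith line "from __future__")

-- ===== PORT A =====
-- lines = code.split("\n"); exact: the separator "\n" is non-empty, so split? is always some
def pvLines (code : String) : List String := (PySem.Str.split? code "\n").getD []

def clean_generated_code_py (code : String) : String :=
  let lines := pvLines code
  let st := lines.foldl
    (fun (st : List String × Bool) line =>
      if st.2 then
        if pvMeaningful line then (st.1 ++ [line], false) else st
      else (st.1 ++ [line], st.2))
    ([], true)
  PySem.Str.join "\n" st.1

-- ===== PORT B =====
-- B's loop over suffixes; rest.partition("\n") is ported by hand (exact for this one-char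
-- separator): line = chars before the first '\n' (takeWhile), the separator was found iff
-- dropWhile leaves a nonempty remainder, and tail = everything after that '\n'.
def pvAltGo (cs : List Char) : List Char :=
  let line := cs.takeWhile (fun c => c != '\n')
  if pvMeaningful (String.ofList line) then cs
  else
    match h : cs.dropWhile (fun c => c != '\n') with
    | [] => []
    | _ :: tail => pvAltGo tail
termination_by cs.length
decreasing_by
  have h1 : (cs.dropWhile (fun c => c != '\n')).length ≤ cs.length := List.length_dropWhile_le _ _
  rw [h] at h1; simp at h1; omega

def clean_generated_code_py_alt (code : String) : String :=
  String.ofList (pvAltGo code.toList)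

-- ===== PRECONDITION & SPEC =====
def Spec_clean_generated_code_py (code : String) (out : String) : Prop := out = clean_generated_code_py_alt code
instance (code : String) (out : String) : Decidable (Spec_clean_generated_code_py code out) := by unfold Spec_clean_generated_code_py; infer_instance

-- ===== CLAIM (what is proved, stated in full; the proofs are below) =====
def Claim_equal_clean_generated_code_py : Prop := ∀ (code : String), Dom_clean_generated_code_py code → Spec_clean_generated_code_py code (clean_generated_code_py code)

-- ===== LEMMAS AND PROOFS =====

-- A's loop body, named for the proofs
def pvStep (st : List String × Bool) (line : String) : List String × Bool :=
  if st.2 then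
    if pvMeaningful line then (st.1 ++ [line], false) else st
  else (st.1 ++ [line], st.2)

-- once the skip flag is cleared, every remaining line is appended
lemma pvStep_foldl_false (lines : List String) (acc : List String) :
    lines.foldl pvStep (acc, false) = (acc ++ lines, false) := by
  induction lines generalizing acc with
  | nil => simp
  | cons l t ih => simp [pvStep, ih]

-- while skipping, A accumulates exactly the dropWhile suffix
lemma pvStep_foldl_true (lines : List String) (acc : List String) :
    (lines.foldl pvStep (acc, true)).1 =
      acc ++ lines.dropWhile (fun l => ! pvMeaningful l) := by
  induction lines generalizing acc with
  | nil => simp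
  | cons l t ih =>
    by_cases h : pvMeaningful l
    · simp [pvStep, h, pvStep_foldl_false]
    · simp [pvStep, h, ih]

-- reference line splitter: the shape Chars.splitOn takes for the one-char separator '\n',
-- structurally parallel to pvAltGo
def pvSplitL (cs : List Char) : List (List Char) :=
  let line := cs.takeWhile (fun c => c != '\n')
  match h : cs.dropWhile (fun c => c != '\n') with
  | [] => [line]
  | _ :: tail => line :: pvSplitL tail
termination_by cs.length
decreasing_by
  have h1 : (cs.dropWhile (fun c => c != '\n')).length ≤ cs.length := List.length_dropWhile_le _ _
  rw [h] at h1; simp at h1; omega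

def pvConsH (cur : List Char) : List (List Char) → List (List Char)
  | [] => [cur.reverse]
  | x :: xs => (cur.reverse ++ x) :: xs

lemma pvSplitL_ne_nil (cs : List Char) : pvSplitL cs ≠ [] := by
  rw [pvSplitL]; split <;> simp

lemma pvSplitL_newline (rest : List Char) :
    pvSplitL ('\n' :: rest) = [] :: pvSplitL rest := by
  conv_lhs => rw [pvSplitL]
  simp [List.takeWhile, List.dropWhile]


lemma pvSplitL_shape_nil (cs : List Char)
    (hd : cs.dropWhile (fun c => c != '\n') = []) :
    pvSplitL cs = [cs.takeWhile (fun c => c != '\n')] := by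
  rw [pvSplitL]
  split
  · rfl
  · next heq => rw [hd] at heq; cases heq

lemma pvSplitL_shape_cons (cs : List Char) (hc : Char) (tail : List Char)
    (hd : cs.dropWhile (fun c => c != '\n') = hc :: tail) :
    pvSplitL cs = cs.takeWhile (fun c => c != '\n') :: pvSplitL tail := by
  rw [pvSplitL]
  split
  · next heq => rw [hd] at heq; cases heq
  · next heq => rw [hd] at heq; cases heq; rfl

lemma pvAltGo_meaningful (cs : List Char)
    (hm : pvMeaningful (String.ofList (cs.takeWhile (fun c => c != '\n'))) = true) :
    pvAltGo cs = cs := by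
  rw [pvAltGo]; simp [hm]

lemma pvAltGo_shape_nil (cs : List Char)
    (hm : ¬ pvMeaningful (String.ofList (cs.takeWhile (fun c => c != '\n'))) = true)
    (hd : cs.dropWhile (fun c => c != '\n') = []) :
    pvAltGo cs = [] := by
  have hm' : pvMeaningful (String.ofList (cs.takeWhile (fun c => c != '\n'))) = false := by
    simpa using hm
  rw [pvAltGo]
  simp only [hm', Bool.false_eq_true, if_false]
  split
  · rfl
  · next heq => rw [hd] at heq; cases heq

lemma pvAltGo_shape_cons (cs : List Char) (hc : Char) (tail : List Char)
    (hm : ¬ pvMeaningful (String.ofList (cs.takeWhile (fun c => c != '\n'))) = true)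
    (hd : cs.dropWhile (fun c => c != '\n') = hc :: tail) :
    pvAltGo cs = pvAltGo tail := by
  have hm' : pvMeaningful (String.ofList (cs.takeWhile (fun c => c != '\n'))) = false := by
    simpa using hm
  rw [pvAltGo]
  simp only [hm', Bool.false_eq_true, if_false]
  split
  · next heq => rw [hd] at heq; cases heq
  · next heq => rw [hd] at heq; cases heq; rfl
lemma pvConsH_splitL_cons (c : Char) (rest cur : List Char) (h : c ≠ '\n') :
    pvConsH cur (pvSplitL (c :: rest)) = pvConsH (c :: cur) (pvSplitL rest) := by
  have hb : (c != '\n') = true := by simp [h]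
  have hdw : (c :: rest).dropWhile (fun c => c != '\n') = rest.dropWhile (fun c => c != '\n') := by
    simp [hb]
  have htw : (c :: rest).takeWhile (fun c => c != '\n') = c :: rest.takeWhile (fun c => c != '\n') := by
    simp [hb]
  cases hd : rest.dropWhile (fun c => c != '\n') with
  | nil =>
    rw [pvSplitL_shape_nil rest hd, pvSplitL_shape_nil (c :: rest) (by rw [hdw, hd]), htw]
    simp [pvConsH]
  | cons x xs =>
    rw [pvSplitL_shape_cons rest x xs hd, pvSplitL_shape_cons (c :: rest) x xs (by rw [hdw, hd]), htw]
    simp [pvConsH]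


lemma pvGo_spec (fuel : Nat) (l cur : List Char) (acc : List (List Char))
    (hf : l.length < fuel) :
    PySem.Chars.splitOn.go ['\n'] fuel l cur acc = acc.reverse ++ pvConsH cur (pvSplitL l) := by
  induction fuel generalizing l cur acc with
  | zero => omega
  | succ fuel ih =>
    cases l with
    | nil =>
      rw [PySem.Chars.splitOn.go]
      rw [pvSplitL_shape_nil [] (by simp)]
      simp [pvConsH]
      omega
    | cons c rest =>
      rw [PySem.Chars.splitOn.go]
      by_cases hc : c = '\n'
      · subst hc
        simp only [show List.isPrefixOf ['\n'] ('\n' :: rest) = true by simp [List.isPrefixOf], if_true]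
        have hdrop : List.drop (['\n'] : List Char).length ('\n' :: rest) = rest := by simp
        rw [hdrop, ih rest [] _ (by simp at hf; omega), pvSplitL_newline]
        cases hs : pvSplitL rest with
        | nil => exact absurd hs (pvSplitL_ne_nil rest)
        | cons x xs => simp [pvConsH]
      · have hp : List.isPrefixOf ['\n'] (c :: rest) = false := by
          simp [List.isPrefixOf]; exact fun h => absurd h.symm hc
        simp only [hp, Bool.false_eq_true, if_false]
        rw [ih rest (c :: cur) acc (by simp at hf; omega)]
        rw [pvConsH_splitL_cons c rest cur hc]

lemma pvSplitOn_eq (cs : List Char) : PySem.Chars.splitOn cs ['\n'] = pvSplitL cs := by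
  unfold PySem.Chars.splitOn
  rw [pvGo_spec _ _ _ _ (by omega)]
  cases hs : pvSplitL cs with
  | nil => exact absurd hs (pvSplitL_ne_nil cs)
  | cons x xs => simp [pvConsH]

lemma pvTailLen (cs : List Char) (c : Char) (tail : List Char)
    (h : cs.dropWhile (fun c => c != '\n') = c :: tail) : tail.length < cs.length := by
  have h1 : (cs.dropWhile (fun c => c != '\n')).length ≤ cs.length := List.length_dropWhile_le _ _
  rw [h] at h1; simp at h1; omega

lemma pvJoin_splitL_aux (n : Nat) : ∀ cs : List Char, cs.length ≤ n →
    PySem.Chars.join ['\n'] (pvSplitL cs) = cs := by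
  induction n with
  | zero =>
    intro cs hn
    have : cs = [] := by cases cs <;> simp_all
    subst this
    rw [pvSplitL_shape_nil [] (by simp), PySem.Chars.join_singleton]
    simp
  | succ n ih =>
    intro cs hn
    cases h : cs.dropWhile (fun c => c != '\n') with
    | nil =>
      rw [pvSplitL_shape_nil cs h, PySem.Chars.join_singleton]
      have := List.takeWhile_append_dropWhile (p := fun c => c != '\n') (l := cs)
      rw [h] at this; simpa using this
    | cons c tail =>
      rw [pvSplitL_shape_cons cs c tail h]
      have hc : c = '\n' := by
        have h2 := List.head?_dropWhile_not (fun c => c != '\n') cs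
        rw [h] at h2; simpa using h2
      have ihtail := ih tail (by have := pvTailLen cs c tail h; omega)
      cases hs : pvSplitL tail with
      | nil => exact absurd hs (pvSplitL_ne_nil tail)
      | cons x xs =>
        rw [hs] at ihtail
        rw [PySem.Chars.join_cons_cons, ihtail]
        have := List.takeWhile_append_dropWhile (p := fun c => c != '\n') (l := cs)
        rw [h, hc] at this
        simpa using this

lemma pvJoin_splitL (cs : List Char) : PySem.Chars.join ['\n'] (pvSplitL cs) = cs :=
  pvJoin_splitL_aux cs.length cs le_rfl

lemma pvJoin_dropWhile_aux (n : Nat) : ∀ cs : List Char, cs.length ≤ n →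
    PySem.Chars.join ['\n']
      ((pvSplitL cs).dropWhile (fun l => ! pvMeaningful (String.ofList l))) = pvAltGo cs := by
  induction n with
  | zero =>
    intro cs hn
    have : cs = [] := by cases cs <;> simp_all
    subst this
    by_cases hm : pvMeaningful (String.ofList (([] : List Char).takeWhile (fun c => c != '\n'))) = true
    · rw [pvAltGo_meaningful [] hm, pvSplitL_shape_nil [] (by simp), List.dropWhile_cons]
      simp only [hm, Bool.not_true, Bool.false_eq_true, if_false]
      simp [PySem.Chars.join_singleton]
    · rw [pvAltGo_shape_nil [] hm (by simp), pvSplitL_shape_nil [] (by simp), List.dropWhile_cons]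
      simp [show pvMeaningful "" = false from by decide, PySem.Chars.join_nil]
  | succ n ih =>
    intro cs hn
    by_cases hm : pvMeaningful (String.ofList (cs.takeWhile (fun c => c != '\n'))) = true
    · rw [pvAltGo_meaningful cs hm]
      cases hd : cs.dropWhile (fun c => c != '\n') with
      | nil =>
        rw [pvSplitL_shape_nil cs hd, List.dropWhile_cons]
        simp only [hm, Bool.not_true, Bool.false_eq_true, if_false]
        rw [← pvSplitL_shape_nil cs hd, pvJoin_splitL]
      | cons x xs =>
        rw [pvSplitL_shape_cons cs x xs hd, List.dropWhile_cons]
        simp only [hm, Bool.not_true, Bool.false_eq_true, if_false]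
        rw [← pvSplitL_shape_cons cs x xs hd, pvJoin_splitL]
    · have hm' : pvMeaningful (String.ofList (cs.takeWhile (fun c => c != '\n'))) = false := by
        simpa using hm
      cases hd : cs.dropWhile (fun c => c != '\n') with
      | nil =>
        rw [pvAltGo_shape_nil cs hm hd, pvSplitL_shape_nil cs hd, List.dropWhile_cons]
        simp [hm', PySem.Chars.join_nil]
      | cons c tail =>
        rw [pvAltGo_shape_cons cs c tail hm hd, pvSplitL_shape_cons cs c tail hd, List.dropWhile_cons]
        simp only [hm', Bool.not_false, if_true]
        exact ih tail (by have := pvTailLen cs c tail hd; omega)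

lemma pvJoin_dropWhile (cs : List Char) :
    PySem.Chars.join ['\n']
      ((pvSplitL cs).dropWhile (fun l => ! pvMeaningful (String.ofList l))) = pvAltGo cs :=
  pvJoin_dropWhile_aux cs.length cs le_rfl

lemma pvLines_eq (code : String) :
    pvLines code = (pvSplitL code.toList).map String.ofList := by
  unfold pvLines
  simp [PySem.Str.split?, PySem.Chars.split?, pvSplitOn_eq]

-- ===== VERDICT (by name: the statement is the Claim_ definition above) =====
set_option maxHeartbeats 1000000 in
theorem clean_generated_code_py_spec : Claim_equal_clean_generated_code_py := by
  intro code _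
  show _ = _
  unfold clean_generated_code_py clean_generated_code_py_alt
  have hstep : (fun (st : List String × Bool) line =>
      if st.2 then
        if pvMeaningful line then (st.1 ++ [line], false) else st
      else (st.1 ++ [line], st.2)) = pvStep := by
    funext st line; rfl
  simp only [hstep, pvStep_foldl_true, List.nil_append, pvLines_eq]
  rw [List.dropWhile_map]
  have hpred : ((fun l => ! pvMeaningful l) ∘ String.ofList) =
      (fun l => ! pvMeaningful (String.ofList l)) := rfl
  rw [hpred]
  have htl : (PySem.Str.join "\n"
      (((pvSplitL code.toList).dropWhile (fun l => ! pvMeaningful (String.ofList l))).map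
        String.ofList)).toList = (String.ofList (pvAltGo code.toList)).toList := by
    rw [PySem.Str.toList_join]
    simp only [List.map_map]
    have hmap : (String.toList ∘ String.ofList) = id := by funext l; simp
    rw [hmap, List.map_id]
    have hsep : ("\n" : String).toList = ['\n'] := rfl
    rw [hsep, pvJoin_dropWhile]
    simp
  exact String.toList_inj.mp htl
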